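-- pv_equiv track=rewrite | github.com/humbertodutra/project-restaurant-orders | src/analyze_log.py | days_that_never_ordered
-- ===== SOURCE A (Python) =====
-- def days_that_never_ordered(data, name):
--     days = set()
--     for order in data:
--         if order[0] == name:
--             days.add(order[2])
--
--     all_days = set(day[2] for day in data)
--     never_ordered_days = all_days - days
--
--     return never_ordered_days
-- ===== SOURCE B (Python) =====
-- def days_that_never_ordered(data, name):
--     by_day = {}
--     for order in data:
--         by_day.setdefault(order[2], set()).add(order[0])
--     never_ordered_days = set()
--     for day, names in by_day.items():
--         if name not in names:
--             never_ordered_days.add(day)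
--     return never_ordered_days
-- ===== Notes on version B (the rewrite author's own statement) =====
-- stated objective: alternative
-- what changed: B builds a per-day index (dict day -> set of names) in one pass and then collects the days whose name-set lacks the target name, instead of A's two flat day-sets subtracted with a set difference.
import Mathlib
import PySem

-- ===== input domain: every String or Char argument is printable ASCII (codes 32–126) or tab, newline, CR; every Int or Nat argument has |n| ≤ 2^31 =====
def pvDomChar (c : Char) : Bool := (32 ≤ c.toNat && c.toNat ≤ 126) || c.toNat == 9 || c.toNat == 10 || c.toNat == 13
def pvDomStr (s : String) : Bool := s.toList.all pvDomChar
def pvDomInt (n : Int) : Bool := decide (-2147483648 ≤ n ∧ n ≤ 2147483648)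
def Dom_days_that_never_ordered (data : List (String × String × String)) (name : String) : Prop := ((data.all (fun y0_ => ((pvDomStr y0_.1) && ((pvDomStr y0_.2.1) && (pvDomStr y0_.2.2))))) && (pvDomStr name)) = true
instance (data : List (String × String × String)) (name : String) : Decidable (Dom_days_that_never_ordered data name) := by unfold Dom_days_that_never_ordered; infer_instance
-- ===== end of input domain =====

-- B replaces A's two flat day-sets and set difference by a per-day index (dict day -> set of names)
-- scanned for days missing the name: an alternative decomposition of the same O(n) task.

-- ===== PORT A =====
def days_that_never_ordered (data : List (String × String × String)) (name : String) : List String :=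
  let days : PySem.Set String :=
    data.foldl (fun s order => if order.1 == name then PySem.Set.add s order.2.2 else s) PySem.Set.empty
  let all_days : PySem.Set String := PySem.Set.ofList (data.map (fun day => day.2.2))
  PySem.Set.diff all_days days

-- ===== PORT B =====
def days_that_never_ordered_alt (data : List (String × String × String)) (name : String) : List String :=
  let by_day : PySem.Dict String (PySem.Set String) :=
    data.foldl (fun d order => d.modify order.2.2 PySem.Set.empty (fun s => PySem.Set.add s order.1)) PySem.Dict.empty
  by_day.items.foldl
    (fun acc p => if !(PySem.Set.contains p.2 name) then PySem.Set.add acc p.1 else acc)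
    PySem.Set.empty

-- ===== PRECONDITION & SPEC =====
def Spec_days_that_never_ordered (data : List (String × String × String)) (name : String) (out : List String) : Prop := out = days_that_never_ordered_alt data name
instance (data : List (String × String × String)) (name : String) (out : List String) : Decidable (Spec_days_that_never_ordered data name out) := by unfold Spec_days_that_never_ordered; infer_instance

-- ===== CLAIM (what is proved, stated in full; the proofs are below) =====
def Claim_equal_days_that_never_ordered : Prop := ∀ (data : List (String × String × String)) (name : String), Dom_days_that_never_ordered data name → Spec_days_that_never_ordered data name (days_that_never_ordered data name)

-- ===== LEMMAS AND PROOFS =====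

-- membership in A's first fold (the 'days' set)
theorem pv_mem_daysFold (name : String) (data : List (String × String × String))
    (init : PySem.Set String) (c : String) :
    c ∈ data.foldl (fun s order => if order.1 == name then PySem.Set.add s order.2.2 else s) init ↔
      c ∈ init ∨ ∃ o ∈ data, o.1 = name ∧ o.2.2 = c := by
  induction data generalizing init with
  | nil => simp
  | cons x xs ih =>
    simp only [List.foldl_cons, ih, List.mem_cons]
    by_cases h : x.1 = name
    · simp only [h, beq_self_eq_true, if_true, PySem.Set.mem_add]
      constructor
      · rintro ((hi | hcx) | ⟨o, ho, hn, hd⟩)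
        · exact Or.inl hi
        · exact Or.inr ⟨x, Or.inl rfl, h, hcx.symm⟩
        · exact Or.inr ⟨o, Or.inr ho, hn, hd⟩
      · rintro (hi | ⟨o, (rfl | ho), hn, hd⟩)
        · exact Or.inl (Or.inl hi)
        · exact Or.inl (Or.inr hd.symm)
        · exact Or.inr ⟨o, ho, hn, hd⟩
    · simp [h]

-- keys of a 'modify' grow like Set.add
theorem pv_keys_modify_add (d : PySem.Dict String (PySem.Set String)) (k : String)
    (d0 : PySem.Set String) (f : PySem.Set String → PySem.Set String) :
    (d.modify k d0 f).keys = PySem.Set.add d.keys k := by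
  rw [PySem.Dict.keys_modify]
  by_cases h : d.contains k = true
  · rw [PySem.Dict.keys_insert_of_contains _ _ h]
    have hm : k ∈ d.keys := (PySem.Dict.contains_iff_mem_keys _ _).mp h
    simp [PySem.Set.add, hm]
  · rw [PySem.Dict.keys_insert_of_not_contains _ _ (eq_false_of_ne_true h)]
    have hm : k ∉ d.keys := fun hm => h ((PySem.Dict.contains_iff_mem_keys _ _).mpr hm)
    simp [PySem.Set.add, hm]

-- keys of B's index fold = deduped days, in order
theorem pv_keys_buildIdx (data : List (String × String × String))
    (d : PySem.Dict String (PySem.Set String)) :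
    (data.foldl (fun d order => d.modify order.2.2 PySem.Set.empty (fun s => PySem.Set.add s order.1)) d).keys
      = PySem.Set.update d.keys (data.map (fun o => o.2.2)) := by
  induction data generalizing d with
  | nil => rfl
  | cons x xs ih =>
    simp only [List.foldl_cons, List.map_cons, ih, pv_keys_modify_add]
    rfl

-- value stored for day c in B's index
theorem pv_getD_buildIdx (data : List (String × String × String))
    (d : PySem.Dict String (PySem.Set String)) (c : String) :
    (data.foldl (fun d order => d.modify order.2.2 PySem.Set.empty (fun s => PySem.Set.add s order.1)) d).getD c PySem.Set.empty
      = PySem.Set.update (d.getD c PySem.Set.empty) ((data.filter (fun o => o.2.2 == c)).map (fun o => o.1)) := by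
  induction data generalizing d with
  | nil => rfl
  | cons x xs ih =>
    simp only [List.foldl_cons, ih, List.filter_cons, PySem.Dict.getD_modify]
    by_cases h : x.2.2 = c
    · subst h
      simp only [beq_self_eq_true]
      rfl
    · have h' : (x.2.2 == c) = false := by simpa using h
      rw [if_neg (fun hx => h hx.symm), h']
      simp

-- B's collection fold, when every key added is fresh, is a filter+map
theorem pv_fold_collect (name : String) (l : List (String × PySem.Set String))
    (acc : PySem.Set String)
    (h : (acc ++ l.map (fun p => p.1)).Nodup) :
    l.foldl (fun acc p => if !(PySem.Set.contains p.2 name) then PySem.Set.add acc p.1 else acc) acc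
      = acc ++ (l.filter (fun p => !(PySem.Set.contains p.2 name))).map (fun p => p.1) := by
  induction l generalizing acc with
  | nil => simp
  | cons x xs ih =>
    rcases List.nodup_append.mp h with ⟨h1, h2, h3⟩
    have hx : x.1 ∉ acc := fun hm => h3 x.1 hm x.1 (by simp) rfl
    simp only [List.filter_cons, List.foldl_cons]
    by_cases hc : PySem.Set.contains x.2 name = true
    · simp only [hc, Bool.not_true, Bool.false_eq_true, if_false]
      exact ih acc (List.nodup_append.mpr
        ⟨h1, h2.of_cons, fun a ha b hb => h3 a ha b (List.mem_cons_of_mem _ hb)⟩)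
    · have hc0 : PySem.Set.contains x.2 name = false := eq_false_of_ne_true hc
      simp only [hc0, Bool.not_false, if_true]
      have hadd : PySem.Set.add acc x.1 = acc ++ [x.1] := by
        simp [PySem.Set.add, hx]
      rw [hadd, ih (acc ++ [x.1]) (by simpa using h)]
      simp

-- ===== VERDICT (by name: the statement is the Claim_ definition above) =====
theorem days_that_never_ordered_spec : Claim_equal_days_that_never_ordered := by
  intro data name _
  unfold Spec_days_that_never_ordered days_that_never_ordered days_that_never_ordered_alt
  simp only []
  set idx := data.foldl (fun d order => d.modify order.2.2 PySem.Set.empty (fun s => PySem.Set.add s order.1)) PySem.Dict.empty with hidx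
  set daysA := data.foldl (fun s order => if order.1 == name then PySem.Set.add s order.2.2 else s) PySem.Set.empty with hdays
  have hkeys : idx.keys = PySem.Set.ofList (data.map (fun o => o.2.2)) := by
    rw [hidx, pv_keys_buildIdx]; rfl
  have hnodupkeys : idx.keys.Nodup := by
    rw [hkeys]; exact PySem.Set.nodup_ofList _
  -- B's collection fold over items = filter+map over items
  have hB : idx.items.foldl
      (fun acc p => if !(PySem.Set.contains p.2 name) then PySem.Set.add acc p.1 else acc)
      PySem.Set.empty
      = (idx.items.filter (fun p => !(PySem.Set.contains p.2 name))).map (fun p => p.1) := by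
    have := pv_fold_collect name idx.items [] (by simpa [PySem.Dict.keys] using hnodupkeys)
    simpa [PySem.Set.empty] using this
  -- rewrite the filter over items as a filter over keys
  have hmapfilter :
      (idx.items.filter (fun p => !(PySem.Set.contains p.2 name))).map (fun p => p.1)
      = idx.keys.filter (fun c => !(PySem.Set.contains (idx.getD c PySem.Set.empty) name)) := by
    rw [PySem.Dict.keys, List.filter_map]
    congr 1
    apply List.filter_congr
    intro p hp
    have hval : idx.getD p.1 [] = p.2 :=
      PySem.Dict.getD_of_mem_items idx (by exact hp) hnodupkeys []
    simp [Function.comp, hval]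
  -- pointwise agreement of the two predicates
  have hpt : ∀ c, PySem.Set.contains (idx.getD c PySem.Set.empty) name = PySem.Set.contains daysA c := by
    intro c
    have h1 : name ∈ idx.getD c PySem.Set.empty ↔ ∃ o ∈ data, o.2.2 = c ∧ o.1 = name := by
      rw [hidx, pv_getD_buildIdx]
      simp only [PySem.Dict.getD_empty, PySem.Set.mem_update]
      simp [List.mem_filter, List.mem_map]
    have h2 : c ∈ daysA ↔ ∃ o ∈ data, o.1 = name ∧ o.2.2 = c := by
      rw [hdays, pv_mem_daysFold]
      simp [PySem.Set.empty]
    rw [Bool.eq_iff_iff, PySem.Set.contains_iff, PySem.Set.contains_iff, h1, h2]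
    constructor
    · rintro ⟨o, ho, h1, h2⟩; exact ⟨o, ho, h2, h1⟩
    · rintro ⟨o, ho, h1, h2⟩; exact ⟨o, ho, h2, h1⟩
  rw [hB, hmapfilter, hkeys]
  unfold PySem.Set.diff
  apply List.filter_congr
  intro c _
  rw [hpt c]
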